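-- pv_equiv track=rewrite | github.com/rrsegnini/BMC-Sequence-Comparison-Tool | BMC_Proyecto1/Proyecto1/algorithms/AlineamientosP.py | matrizParaWeb
-- ===== SOURCE A (Python) =====
-- def matrizParaWeb(A, B, matrizPesos, matrizFlechas):
--     resultado = [["", "_"], ["_"]]
--     # Agrear las letras de la cadena B en la primer columna
--     # Por cada fila en la matriz (cadena B)
--     for i in range(2, len(matrizPesos) + 1):
--         resultado.append([B[i - 2]])
--
--     # Agregar las letras de la cadena A en la primer fila
--     # Por cada columna en la primer fila de la matriz (cadena A)
--     for j in range(2, len(matrizPesos[0]) + 1):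
--         resultado[0].append(A[j - 2])
--
--     # Agrear el resto de la matriz con las flechas.
--     directions = ["", "⬅ ", "", "⬆ ", "⬅⬆ ", "⬉ ", "⬅⬉ ", "", "⬉⬆ ", "⬅⬉⬆ "]
--     # directions = ["", "⬅", "", "⬆", "⬅⬆", "⬉", "⬅⬉", "", "⬉⬆", "⬅⬉⬆"]
--
--     for i in range(1, len(matrizPesos) + 1):
--         for j in range(1, len(matrizPesos[0]) + 1):
--             resultado[i].append(directions[matrizFlechas[i - 1][j - 1]] + str(matrizPesos[i - 1][j - 1]))
--
--     return resultado
-- ===== SOURCE B (Python) =====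
-- def matrizParaWeb(A, B, matrizPesos, matrizFlechas):
--     directions = ["", "⬅ ", "", "⬆ ", "⬅⬆ ", "⬉ ", "⬅⬉ ", "", "⬉⬆ ", "⬅⬉⬆ "]
--     n = len(matrizPesos)
--     m = len(matrizPesos[0])
--     # column-major construction: label column, then one column per weight column
--     cols = [["", "_"] + [B[i] for i in range(n - 1)]]
--     for j in range(m):
--         top = "_" if j == 0 else A[j - 1]
--         cols.append([top] + [directions[matrizFlechas[i][j]] + str(matrizPesos[i][j])
--                              for i in range(n)])
--     return [list(t) for t in zip(*cols)]
-- ===== Notes on version B (the rewrite author's own statement) =====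
-- stated objective: alternative
-- what changed: B constructs the grid column-major — the label column and one finished column per weight column — and obtains the rows by transposing with zip(*cols), instead of A's row-major skeleton followed by in-place appends to each row.
-- outside the precondition, e.g. on matrizParaWeb('a', 'b', [[]], [[]]): A returns [['', '_'], ['_']], B returns [[''], ['_']]; on matrizParaWeb('xy', 'aa', [[]], []): A returns [['', '_'], ['_']], B returns [[''], ['_']]
import Mathlib
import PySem

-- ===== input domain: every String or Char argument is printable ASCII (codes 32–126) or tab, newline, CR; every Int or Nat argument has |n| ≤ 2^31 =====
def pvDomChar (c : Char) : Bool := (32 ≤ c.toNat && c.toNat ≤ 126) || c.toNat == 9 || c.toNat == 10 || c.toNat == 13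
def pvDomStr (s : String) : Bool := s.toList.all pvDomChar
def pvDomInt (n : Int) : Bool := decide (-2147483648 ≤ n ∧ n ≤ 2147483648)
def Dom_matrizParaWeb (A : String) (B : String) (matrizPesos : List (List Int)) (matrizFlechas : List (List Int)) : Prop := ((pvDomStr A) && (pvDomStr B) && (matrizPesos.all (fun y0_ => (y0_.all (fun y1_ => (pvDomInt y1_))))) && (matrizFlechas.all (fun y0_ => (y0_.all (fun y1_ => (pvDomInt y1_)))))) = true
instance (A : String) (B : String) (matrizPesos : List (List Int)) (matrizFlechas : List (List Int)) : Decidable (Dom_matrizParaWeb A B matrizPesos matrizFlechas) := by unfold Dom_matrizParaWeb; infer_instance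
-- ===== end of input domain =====

-- B builds the display grid column-major (label column, then one finished column per weight
-- column) and transposes with zip(*cols), instead of A's row-skeleton plus in-place appends;
-- objective: alternative decomposition, same values on Pre_.

-- ===== PORT A =====
-- shared primitive: Python s[i] as a 1-character string (default "" only reached outside Pre_)
def pvCharAt (s : String) (i : Int) : String :=
  ((PySem.Str.pyGet? s i).map (fun c => String.ofList [c])).getD ""

def pvDirections : List String := ["", "⬅ ", "", "⬆ ", "⬅⬆ ", "⬉ ", "⬅⬉ ", "", "⬉⬆ ", "⬅⬉⬆ "]

def matrizParaWeb (A : String) (B : String) (matrizPesos : List (List Int)) (matrizFlechas : List (List Int)) : List (List String) :=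
  let resultado : List (List String) := [["", "_"], ["_"]]
  let resultado := (PySem.List.pyRange 2 ((matrizPesos.length : Int) + 1) 1).foldl
      (fun acc i => acc ++ [[pvCharAt B (i - 2)]]) resultado
  let resultado := (PySem.List.pyRange 2 (((PySem.List.pyGetD matrizPesos 0 []).length : Int) + 1) 1).foldl
      (fun acc j => PySem.List.pySetD acc 0 (PySem.List.pyGetD acc 0 [] ++ [pvCharAt A (j - 2)])) resultado
  (PySem.List.pyRange 1 ((matrizPesos.length : Int) + 1) 1).foldl
      (fun acc i =>
        (PySem.List.pyRange 1 (((PySem.List.pyGetD matrizPesos 0 []).length : Int) + 1) 1).foldl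
          (fun acc2 j => PySem.List.pySetD acc2 i (PySem.List.pyGetD acc2 i [] ++
            [PySem.List.pyGetD pvDirections (PySem.List.pyGetD (PySem.List.pyGetD matrizFlechas (i - 1) []) (j - 1) 0) ""
              ++ PySem.Int.toStr (PySem.List.pyGetD (PySem.List.pyGetD matrizPesos (i - 1) []) (j - 1) 0)]))
          acc)
      resultado

-- ===== PORT B =====
-- Python zip(*cols): rows up to the shortest column (zip of no iterables is empty)
def pvZipN (cols : List (List String)) : List (List String) :=
  (List.range (((cols.map List.length).min?).getD 0)).map
    (fun r => cols.map (fun c => c.getD r ""))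

def matrizParaWeb_alt (A : String) (B : String) (matrizPesos : List (List Int)) (matrizFlechas : List (List Int)) : List (List String) :=
  let n : Int := (matrizPesos.length : Int)
  let m : Int := ((PySem.List.pyGetD matrizPesos 0 []).length : Int)
  let cols : List (List String) :=
    [["", "_"] ++ (PySem.List.pyRange 0 (n - 1) 1).map (fun i => pvCharAt B i)]
  let cols := (PySem.List.pyRange 0 m 1).foldl
    (fun cs j => cs ++ [(if j == (0 : Int) then "_" else pvCharAt A (j - 1)) ::
        (PySem.List.pyRange 0 n 1).map (fun i =>
          PySem.List.pyGetD pvDirections (PySem.List.pyGetD (PySem.List.pyGetD matrizFlechas i []) j 0) ""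
            ++ PySem.Int.toStr (PySem.List.pyGetD (PySem.List.pyGetD matrizPesos i []) j 0))]) cols
  pvZipN cols

-- ===== PRECONDITION & SPEC =====
-- Pre_ excludes (a) inputs where Python A raises (empty weight matrix, strings too short, a used
-- row shorter than the first weight row, an arrow code outside Python's index range -10..9,
-- fewer arrow rows than weight rows), and (b) the degenerate corner of an empty first weight row,
-- where A returns label-only rows while B's column-wise zip naturally yields one-element rows —
-- a corner no caller of this display routine would specify.
def Pre_matrizParaWeb (A : String) (B : String) (matrizPesos : List (List Int)) (matrizFlechas : List (List Int)) : Prop :=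
  matrizPesos ≠ [] ∧
  1 ≤ (matrizPesos.headD []).length ∧
  (matrizPesos.length : Int) - 1 ≤ PySem.Str.len B ∧
  ((matrizPesos.headD []).length : Int) - 1 ≤ PySem.Str.len A ∧
  matrizPesos.length ≤ matrizFlechas.length ∧
  (∀ row ∈ matrizPesos, (matrizPesos.headD []).length ≤ row.length) ∧
  (∀ row ∈ matrizFlechas.take matrizPesos.length,
      (matrizPesos.headD []).length ≤ row.length ∧
      ∀ v ∈ row.take (matrizPesos.headD []).length, -10 ≤ v ∧ v ≤ 9)
instance (A : String) (B : String) (matrizPesos : List (List Int)) (matrizFlechas : List (List Int)) : Decidable (Pre_matrizParaWeb A B matrizPesos matrizFlechas) := by unfold Pre_matrizParaWeb; infer_instance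

def pvWitness_matrizParaWeb : String × String × List (List Int) × List (List Int) :=
  ("x", "a", [[0, 1], [2, 3]], [[0, 1], [3, 5]])

def Spec_matrizParaWeb (A : String) (B : String) (matrizPesos : List (List Int)) (matrizFlechas : List (List Int)) (out : List (List String)) : Prop := out = matrizParaWeb_alt A B matrizPesos matrizFlechas
instance (A : String) (B : String) (matrizPesos : List (List Int)) (matrizFlechas : List (List Int)) (out : List (List String)) : Decidable (Spec_matrizParaWeb A B matrizPesos matrizFlechas out) := by unfold Spec_matrizParaWeb; infer_instance

-- ===== CLAIM =====
def Claim_equal_matrizParaWeb : Prop := ∀ (A : String) (B : String) (matrizPesos : List (List Int)) (matrizFlechas : List (List Int)), Dom_matrizParaWeb A B matrizPesos matrizFlechas → Pre_matrizParaWeb A B matrizPesos matrizFlechas → Spec_matrizParaWeb A B matrizPesos matrizFlechas (matrizParaWeb A B matrizPesos matrizFlechas)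

-- ===== LEMMAS AND PROOFS =====
-- row-major intermediate form: both ports are proved equal to it
def pvMatSpec (A : String) (B : String) (P F : List (List Int)) : List (List String) :=
  let n : Int := (P.length : Int)
  let m : Int := ((PySem.List.pyGetD P 0 []).length : Int)
  ("" :: "_" :: (PySem.List.pyRange 0 (m - 1) 1).map (fun j => pvCharAt A j)) ::
  (PySem.List.pyRange 0 n 1).map (fun i =>
    (if i == (0 : Int) then "_" else pvCharAt B (i - 1)) ::
    (PySem.List.pyRange 0 m 1).map (fun j =>
      PySem.List.pyGetD pvDirections (PySem.List.pyGetD (PySem.List.pyGetD F i []) j 0) ""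
        ++ PySem.Int.toStr (PySem.List.pyGetD (PySem.List.pyGetD P i []) j 0)))

theorem fold_row0 (f : Int → String) (l : List Int) (h : List String) (t : List (List String)) :
    l.foldl (fun acc j => PySem.List.pySetD acc 0 (PySem.List.pyGetD acc 0 [] ++ [f j])) (h :: t)
      = (h ++ l.map f) :: t := by
  induction l generalizing h with
  | nil => simp
  | cons j js ih =>
    simp only [List.foldl_cons, List.map_cons]
    rw [show PySem.List.pySetD (h :: t) (0:Int) (PySem.List.pyGetD (h :: t) 0 [] ++ [f j]) = (h ++ [f j]) :: t by simp [pysem]]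
    rw [ih]
    simp

theorem fold_cell (cs : List Int) (h : Int → String) (k : Nat) (acc : List (List String)) :
    cs.foldl (fun acc2 j => PySem.List.pySetD acc2 (k : Int) (PySem.List.pyGetD acc2 (k : Int) [] ++ [h j])) acc
      = PySem.List.pySetD acc (k : Int) (PySem.List.pyGetD acc (k : Int) [] ++ cs.map h) := by
  induction cs generalizing acc with
  | nil =>
    simp only [List.foldl_nil, List.map_nil, List.append_nil, PySem.List.pySetD_natCast,
      PySem.List.pyGetD_natCast]
    by_cases hk : k < acc.length
    · rw [List.getD_eq_getElem _ _ hk, List.set_getElem_self]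
    · rw [List.set_eq_of_length_le (by omega)]
  | cons c cs ih =>
    simp only [List.foldl_cons, List.map_cons]
    rw [ih]
    simp only [PySem.List.pySetD_natCast, PySem.List.pyGetD_natCast]
    by_cases hk : k < acc.length
    · rw [List.getD_eq_getElem _ _ hk, List.getD_eq_getElem _ _ (by simp [hk]),
        List.getElem_set_self, List.set_set]
      simp
    · have hl : acc.length ≤ k := by omega
      rw [List.set_eq_of_length_le (by simp [hl]), List.set_eq_of_length_le hl,
        List.set_eq_of_length_le hl]

theorem fold_rows (g : Int → List String) (rows : List (List String)) (pre : List (List String)) :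
    (PySem.List.pyRange (pre.length : Int) (((pre.length + rows.length : Nat) : Int)) 1).foldl
      (fun acc i => PySem.List.pySetD acc i (PySem.List.pyGetD acc i [] ++ g i)) (pre ++ rows)
      = pre ++ (rows.zipIdx pre.length).map (fun p => p.1 ++ g (p.2 : Int)) := by
  induction rows generalizing pre with
  | nil => simp [PySem.List.pyRange_one_eq_nil]
  | cons r rs ih =>
    rw [PySem.List.pyRange_one_cons (by push_cast [List.length_cons]; omega)]
    simp only [List.foldl_cons]
    have h1 : PySem.List.pyGetD (pre ++ r :: rs) (pre.length : Int) [] = r := by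
      simp [PySem.List.pyGetD_natCast, List.getD_eq_getElem?_getD]
    have h2 : PySem.List.pySetD (pre ++ r :: rs) (pre.length : Int) (r ++ g pre.length)
        = (pre ++ [r ++ g (pre.length : Int)]) ++ rs := by
      simp [pysem]
    rw [h1, h2]
    have h3 : ((pre.length : Int) + 1) = (((pre ++ [r ++ g (pre.length : Int)]).length : Nat) : Int) := by
      simp
    have h4 : ((pre.length + (r :: rs).length : Nat) : Int)
        = (((pre ++ [r ++ g (pre.length : Int)]).length + rs.length : Nat) : Int) := by
      simp; omega
    rw [h3, h4, ih]
    simp [List.zipIdx_cons]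

theorem fold_rows' (g : Int → List String) (rows pre : List (List String)) (a b : Int)
    (ha : a = (pre.length : Int)) (hb : b = ((pre.length + rows.length : Nat) : Int)) :
    (PySem.List.pyRange a b 1).foldl
      (fun acc i => PySem.List.pySetD acc i (PySem.List.pyGetD acc i [] ++ g i)) (pre ++ rows)
      = pre ++ (rows.zipIdx pre.length).map (fun p => p.1 ++ g (p.2 : Int)) := by
  subst ha hb
  exact fold_rows g rows pre

theorem cells_eq (prow frow : List Int) (m : Nat) :
    (PySem.List.pyRange 1 ((m:Int)+1) 1).map (fun j =>
        PySem.List.pyGetD pvDirections (PySem.List.pyGetD frow (j-1) 0) ""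
          ++ PySem.Int.toStr (PySem.List.pyGetD prow (j-1) 0))
      = (PySem.List.pyRange 0 (m:Int) 1).map (fun j =>
        PySem.List.pyGetD pvDirections (PySem.List.pyGetD frow j 0) ""
          ++ PySem.Int.toStr (PySem.List.pyGetD prow j 0)) := by
  simp only [PySem.List.pyRange_one, List.map_map]
  congr 1
  · funext t
    simp only [Function.comp_apply]
    congr 2
    · congr 1; omega
    · congr 1; omega
  · norm_num

theorem header_eq (Astr : String) (m : Nat) :
    (PySem.List.pyRange 2 ((m:Int)+1) 1).map (fun j => pvCharAt Astr (j-2))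
      = (PySem.List.pyRange 0 ((m:Int)-1) 1).map (fun j => pvCharAt Astr j) := by
  simp only [PySem.List.pyRange_one, List.map_map]
  congr 1
  · funext t
    simp only [Function.comp_apply]
    congr 1
    omega
  · congr 1
    omega

-- A's port equals the row-major form (needs only a nonempty weight matrix)
theorem a_eq_spec (A B : String) (P F : List (List Int)) (hn : P ≠ []) :
    matrizParaWeb A B P F = pvMatSpec A B P F := by
  unfold matrizParaWeb pvMatSpec
  simp only []
  set n := P.length with hn'
  set m := (PySem.List.pyGetD P 0 []).length with hm'
  have hn1 : 1 ≤ n := by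
    cases P with
    | nil => exact absurd rfl hn
    | cons a l => simp [hn']
  rw [PySem.List.foldl_append_singleton_eq_map]
  rw [show ([["", "_"], ["_"]] : List (List String)) ++ (PySem.List.pyRange 2 ((n:Int)+1) 1).map (fun i => [pvCharAt B (i-2)])
      = ["", "_"] :: (["_"] :: (PySem.List.pyRange 2 ((n:Int)+1) 1).map (fun i => [pvCharAt B (i-2)])) from rfl]
  rw [fold_row0]
  have hb : ∀ (acc : List (List String)) (i : Int), i ∈ PySem.List.pyRange 1 ((n:Int)+1) 1 →
      (PySem.List.pyRange 1 ((m:Int)+1) 1).foldl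
        (fun acc2 j => PySem.List.pySetD acc2 i (PySem.List.pyGetD acc2 i [] ++
          [PySem.List.pyGetD pvDirections (PySem.List.pyGetD (PySem.List.pyGetD F (i - 1) []) (j - 1) 0) ""
            ++ PySem.Int.toStr (PySem.List.pyGetD (PySem.List.pyGetD P (i - 1) []) (j - 1) 0)])) acc
      = PySem.List.pySetD acc i
        (PySem.List.pyGetD acc i [] ++ (PySem.List.pyRange 1 ((m:Int)+1) 1).map (fun j =>
          PySem.List.pyGetD pvDirections (PySem.List.pyGetD (PySem.List.pyGetD F (i - 1) []) (j - 1) 0) ""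
            ++ PySem.Int.toStr (PySem.List.pyGetD (PySem.List.pyGetD P (i - 1) []) (j - 1) 0))) := by
    intro acc i hi
    rw [PySem.List.mem_pyRange_one] at hi
    obtain ⟨k, rfl⟩ : ∃ k : Nat, i = (k:Int) := ⟨i.toNat, by omega⟩
    exact fold_cell _ _ k acc
  rw [PySem.List.foldl_congr_mem _ _ _ _ hb]
  set tr := (PySem.List.pyRange 2 ((n:Int)+1) 1).map (fun i => [pvCharAt B (i-2)]) with htr'
  have htr : tr.length = n - 1 := by
    simp only [htr', List.length_map, PySem.List.length_pyRange_one]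
    omega
  set hdr := (["", "_"] : List String) ++ (PySem.List.pyRange 2 ((m:Int)+1) 1).map (fun j => pvCharAt A (j-2)) with hhdr
  rw [show hdr :: ["_"] :: tr = [hdr] ++ (["_"] :: tr) from rfl]
  rw [fold_rows' _ (["_"] :: tr) [hdr] 1 ((n:Int)+1) (by simp)
    (by simp [htr]; omega)]
  simp only [List.singleton_append, List.length_singleton]
  congr 1
  · rw [hhdr, header_eq]
    rfl
  · apply List.ext_getElem
    · simp [htr]
      omega
    · intro k h1 h2
      have hk : k < n := by
        simp only [List.length_map, List.length_zipIdx, List.length_cons, htr] at h1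
        omega
      simp only [List.getElem_map, List.getElem_zipIdx, PySem.List.getElem_pyRange_one,
        zero_add]
      have e1 : PySem.List.pyGetD F (((1 + k : Nat) : Int) - 1) [] = PySem.List.pyGetD F (k : Int) [] := by
        congr 1; push_cast; omega
      have e2 : PySem.List.pyGetD P (((1 + k : Nat) : Int) - 1) [] = PySem.List.pyGetD P (k : Int) [] := by
        congr 1; push_cast; omega
      rw [e1, e2, cells_eq]
      cases k with
      | zero => simp
      | succ k' =>
        simp only [List.getElem_cons_succ, htr', List.getElem_map,
          PySem.List.getElem_pyRange_one]
        have hif : (((k' + 1 : Nat) : Int) == (0 : Int)) = false := by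
          simp
          omega
        rw [hif]
        simp only [List.cons_append, List.nil_append, Bool.false_eq_true, if_false]
        congr 2
        push_cast
        omega

theorem min?_replicate_succ (a : Nat) (k : Nat) : (List.replicate (k + 1) a).min? = some a := by
  induction k with
  | zero => rfl
  | succ k ih =>
    rw [List.replicate_succ, List.min?_cons, ih]
    simp

-- header tail shift: columns 1..m-1 carry A[j-1]
theorem hdr_shift (Astr : String) (m : Nat) :
    (PySem.List.pyRange 1 (m : Int) 1).map (fun j => pvCharAt Astr (j - 1))
      = (PySem.List.pyRange 0 ((m : Int) - 1) 1).map (fun j => pvCharAt Astr j) := by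
  simp only [PySem.List.pyRange_one, List.map_map]
  congr 1
  · funext t
    simp only [Function.comp_apply]
    congr 1
    omega
  · congr 1
    omega

-- B's port equals the row-major form
theorem b_eq_spec (A B : String) (P F : List (List Int)) (hn : P ≠ [])
    (hm : 1 ≤ (P.headD []).length) :
    matrizParaWeb_alt A B P F = pvMatSpec A B P F := by
  unfold matrizParaWeb_alt pvMatSpec pvZipN
  simp only []
  set n := P.length with hn'
  set m := (PySem.List.pyGetD P 0 []).length with hm'
  have hn1 : 1 ≤ n := by
    cases P with
    | nil => exact absurd rfl hn
    | cons a l => simp [hn']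
  have hm1 : 1 ≤ m := by
    cases P with
    | nil => exact absurd rfl hn
    | cons a l =>
      simpa [hm', PySem.List.pyGetD_zero_cons] using hm
  rw [PySem.List.foldl_append_singleton_eq_map]
  set col0 := (["", "_"] : List String) ++ (PySem.List.pyRange 0 ((n:Int) - 1) 1).map (fun i => pvCharAt B i) with hcol0
  set colF := fun (j : Int) => (if j == (0:Int) then "_" else pvCharAt A (j - 1)) ::
      (PySem.List.pyRange 0 (n:Int) 1).map (fun i =>
        PySem.List.pyGetD pvDirections (PySem.List.pyGetD (PySem.List.pyGetD F i []) j 0) ""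
          ++ PySem.Int.toStr (PySem.List.pyGetD (PySem.List.pyGetD P i []) j 0)) with hcolF
  have hlen0 : col0.length = n + 1 := by
    simp only [hcol0, List.length_append, List.length_map, PySem.List.length_pyRange_one]
    simp
    omega
  have hlenF : ∀ j : Int, (colF j).length = n + 1 := by
    intro j
    simp [hcolF, PySem.List.length_pyRange_one]
  have hmin : ((([col0] ++ (PySem.List.pyRange 0 (m:Int) 1).map colF).map List.length).min?).getD 0 = n + 1 := by
    have : ([col0] ++ (PySem.List.pyRange 0 (m:Int) 1).map colF).map List.length
        = List.replicate (1 + m) (n + 1) := by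
      apply List.ext_getElem
      · simp [PySem.List.length_pyRange_one]
        omega
      · intro k h1 h2
        simp only [List.getElem_replicate]
        rcases k with _ | k
        · simpa using hlen0
        · simp only [List.map_append, List.map_cons, List.map_nil, List.map_map]
          rw [List.getElem_append_right (by simp)]
          simp only [List.getElem_map]
          exact hlenF _
    rw [this, show 1 + m = m + 1 by omega, min?_replicate_succ]
    rfl
  rw [hmin]
  apply List.ext_getElem
  · simp [PySem.List.length_pyRange_one]
  · intro r h1 h2
    have hr : r < n + 1 := by simpa using h1
    simp only [List.getElem_map, List.getElem_range, List.map_append, List.map_cons, List.map_nil]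
    rcases r with _ | k
    · -- header row
      simp only [List.singleton_append, List.getElem_cons_zero]
      have hc0 : col0.getD 0 "" = "" := by simp [hcol0]
      rw [hc0]
      congr 1
      have hsplit : PySem.List.pyRange 0 (m:Int) 1 = 0 :: PySem.List.pyRange 1 (m:Int) 1 := by
        rw [PySem.List.pyRange_one_cons (by omega : (0:Int) < (m:Int))]
        norm_num
      rw [hsplit]
      simp only [List.map_map, List.map_cons]
      have hc1 : (colF 0).getD 0 "" = "_" := by simp [hcolF]
      rw [hc1]
      congr 1
      rw [← hdr_shift A m]
      apply List.map_congr_left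
      intro j hj
      rw [PySem.List.mem_pyRange_one] at hj
      have hjne : (j == (0:Int)) = false := by simp; omega
      simp [hcolF]
      intro h0
      exact absurd h0 (by omega)
    · -- data row k (matrix row index k)
      simp only [List.singleton_append, List.getElem_cons_succ, List.getElem_map,
        PySem.List.getElem_pyRange_one, zero_add]
      have hkn : k < n := by
        omega
      congr 1
      · -- the label
        simp only [hcol0]
        rcases k with _ | s
        · simp
        · have : ((("" :: "_" :: (PySem.List.pyRange 0 ((n:Int) - 1) 1).map (fun i => pvCharAt B i)) : List String)).getD (s + 2) ""
              = ((PySem.List.pyRange 0 ((n:Int) - 1) 1).map (fun i => pvCharAt B i)).getD s "" := by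
            rfl
          simp only [List.cons_append, List.nil_append]
          rw [this]
          have hs : s < ((PySem.List.pyRange 0 ((n:Int) - 1) 1).map (fun i => pvCharAt B i)).length := by
            simp only [List.length_map, PySem.List.length_pyRange_one]
            omega
          rw [List.getD_eq_getElem _ _ hs]
          simp only [List.getElem_map, PySem.List.getElem_pyRange_one, zero_add]
          have hif : (((s + 1 : Nat) : Int) == (0:Int)) = false := by
            simp
            omega
          rw [hif]
          simp only [Bool.false_eq_true, if_false]
          congr 1
          push_cast
          omega
      · -- the cells
        rw [List.map_map]
        apply List.map_congr_left
        intro j _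
        simp only [Function.comp_apply]
        have : (colF j).getD (k + 1) ""
            = ((PySem.List.pyRange 0 (n:Int) 1).map (fun i =>
                PySem.List.pyGetD pvDirections (PySem.List.pyGetD (PySem.List.pyGetD F i []) j 0) ""
                  ++ PySem.Int.toStr (PySem.List.pyGetD (PySem.List.pyGetD P i []) j 0))).getD k "" := by
          simp [hcolF]
        rw [this]
        have hkl : k < ((PySem.List.pyRange 0 (n:Int) 1).map (fun i =>
            PySem.List.pyGetD pvDirections (PySem.List.pyGetD (PySem.List.pyGetD F i []) j 0) ""
              ++ PySem.Int.toStr (PySem.List.pyGetD (PySem.List.pyGetD P i []) j 0))).length := by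
          simp only [List.length_map, PySem.List.length_pyRange_one]
          omega
        rw [List.getD_eq_getElem _ _ hkl]
        simp only [List.getElem_map, PySem.List.getElem_pyRange_one, zero_add]

-- ===== VERDICT =====
theorem matrizParaWeb_spec : Claim_equal_matrizParaWeb := by
  intro A B P F _ hPre
  unfold Spec_matrizParaWeb
  rw [a_eq_spec A B P F hPre.1, b_eq_spec A B P F hPre.1 hPre.2.1]
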